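-- pv_equiv track=rewrite | github.com/KevzPeter/Advent-of-Code-2025 | Dec_10/solution_1.py | values_needed_to_xor_to_target
-- ===== SOURCE A (Python) =====
-- def values_needed_to_xor_to_target(button_values, target):
--     from collections import deque
--
--     visited = {0}
--     queue = deque([(0, [])])  # (current_xor, buttons_used)
--
--     while queue:
--         current_xor, buttons_used = queue.popleft()
--
--         if current_xor == target:
--             return tuple(buttons_used)
--
--         for button in button_values:
--             new_xor = current_xor ^ button
--             if new_xor not in visited:
--                 visited.add(new_xor)
--                 queue.append((new_xor, buttons_used + [button]))
--
--     return None
-- ===== SOURCE B (Python) =====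
-- def values_needed_to_xor_to_target(button_values, target):
--     from collections import deque
--
--     if target == 0:
--         return ()
--
--     visited = {0}
--     parent = {}  # first-discovery parent pointer: new_xor -> (previous_xor, button)
--     queue = deque([0])
--
--     while queue:
--         x = queue.popleft()
--         if x == target:
--             path = []
--             while x != 0:
--                 p, b = parent[x]
--                 path.append(b)
--                 x = p
--             path.reverse()
--             return tuple(path)
--         for button in button_values:
--             nx = x ^ button
--             if nx not in visited:
--                 visited.add(nx)
--                 parent[nx] = (x, button)
--                 queue.append(nx)
--
--     return None
-- ===== Notes on version B (the rewrite author's own statement) =====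
-- stated objective: idiomatic
-- what changed: The queue holds bare XOR states instead of (state, full-path) pairs; a parent dict set at first discovery records (previous_xor, button), and the button sequence is reconstructed by walking parent pointers back to 0 only when the target is popped (target==0 answered up front).
import Mathlib
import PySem

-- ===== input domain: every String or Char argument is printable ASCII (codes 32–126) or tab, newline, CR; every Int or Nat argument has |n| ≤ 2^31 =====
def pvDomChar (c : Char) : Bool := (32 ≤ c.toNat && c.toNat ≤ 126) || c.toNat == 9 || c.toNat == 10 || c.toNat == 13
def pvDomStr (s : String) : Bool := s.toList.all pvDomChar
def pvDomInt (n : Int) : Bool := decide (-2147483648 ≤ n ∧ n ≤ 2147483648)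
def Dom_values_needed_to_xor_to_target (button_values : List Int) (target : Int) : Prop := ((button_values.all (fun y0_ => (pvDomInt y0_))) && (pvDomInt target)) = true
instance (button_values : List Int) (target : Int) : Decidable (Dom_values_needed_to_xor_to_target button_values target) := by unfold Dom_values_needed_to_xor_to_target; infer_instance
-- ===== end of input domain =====

-- B replaces the path-carrying BFS queue by a queue of bare XOR states plus a first-discovery
-- parent dict, reconstructing the button sequence only when the target is popped (idiomatic BFS).

-- ===== PORT A =====
-- BFS loop of A; fuel bounds the number of pops (≤ 2^n reachable subset-XOR states + 1, so the
-- fuel chosen in the wrapper is never exhausted on a run the Python performs).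
def loopA (bs : List Int) (target : Int) : Nat → List (Int × List Int) → PySem.Set Int → Option (List Int)
  | 0, _, _ => none
  | _ + 1, [], _ => none
  | n + 1, (x, l) :: q, vis =>
    if x = target then some l
    else
      let st := bs.foldl (fun (st : List (Int × List Int) × PySem.Set Int) b =>
        let nx := PySem.Int.bxor x b
        if PySem.Set.contains st.2 nx then st
        else (st.1 ++ [(nx, l ++ [b])], PySem.Set.add st.2 nx)) (q, vis)
      loopA bs target n st.1 st.2

def values_needed_to_xor_to_target (button_values : List Int) (target : Int) : Option (List Int) :=
  loopA button_values target (2 ^ button_values.length + 1) [(0, [])] (PySem.Set.ofList [0])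

-- ===== PORT B =====
-- path reconstruction: walk parent pointers back to 0 (fuel = dict size + 1 suffices: each
-- recorded path is shorter than the dict, see the proofs below).
def reconB : Nat → PySem.Dict Int (Int × Int) → Int → List Int → Option (List Int)
  | 0, _, _, _ => none
  | n + 1, d, x, acc =>
    if x = 0 then some acc.reverse
    else match d.get? x with
      | none => none
      | some (p, b) => reconB n d p (acc ++ [b])

def loopB (bs : List Int) (target : Int) : Nat → List Int → PySem.Set Int → PySem.Dict Int (Int × Int) → Option (List Int)
  | 0, _, _, _ => none
  | _ + 1, [], _, _ => none
  | n + 1, x :: q, vis, par =>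
    if x = target then reconB (par.size + 1) par x []
    else
      let st := bs.foldl (fun (st : List Int × PySem.Set Int × PySem.Dict Int (Int × Int)) b =>
        let nx := PySem.Int.bxor x b
        if PySem.Set.contains st.2.1 nx then st
        else (st.1 ++ [nx], PySem.Set.add st.2.1 nx, st.2.2.insert nx (x, b))) (q, vis, par)
      loopB bs target n st.1 st.2.1 st.2.2

def values_needed_to_xor_to_target_alt (button_values : List Int) (target : Int) : Option (List Int) :=
  if target = 0 then some []
  else loopB button_values target (2 ^ button_values.length + 1) [0] (PySem.Set.ofList [0]) PySem.Dict.empty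

-- ===== PRECONDITION & SPEC =====
def Spec_values_needed_to_xor_to_target (button_values : List Int) (target : Int) (out : Option (List Int)) : Prop := out = values_needed_to_xor_to_target_alt button_values target
instance (button_values : List Int) (target : Int) (out : Option (List Int)) : Decidable (Spec_values_needed_to_xor_to_target button_values target out) := by unfold Spec_values_needed_to_xor_to_target; infer_instance

-- ===== CLAIM (what is proved, stated in full; the proofs are below) =====
def Claim_equal_values_needed_to_xor_to_target : Prop := ∀ (button_values : List Int) (target : Int), Dom_values_needed_to_xor_to_target button_values target → Spec_values_needed_to_xor_to_target button_values target (values_needed_to_xor_to_target button_values target)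

-- ===== LEMMAS AND PROOFS =====

-- Good d x lr : lr is the REVERSED button path recorded in the parent dict from 0 up to x.
def Good (d : PySem.Dict Int (Int × Int)) : Int → List Int → Prop
  | x, [] => x = 0
  | x, b :: lr => ∃ p, d.get? x = some (p, b) ∧ Good d p lr

-- The bisimulation invariant between A's queue of (state, path) pairs and B's bare queue + parent dict.
def BfsInv (qA : List (Int × List Int)) (qB : List Int) (vis : PySem.Set Int) (par : PySem.Dict Int (Int × Int)) : Prop :=
  qB = qA.map Prod.fst ∧
  PySem.Set.contains vis 0 = true ∧
  par.get? 0 = none ∧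
  (∀ k, (par.get? k).isSome = true → PySem.Set.contains vis k = true) ∧
  (∀ p ∈ qA, Good par p.1 p.2.reverse ∧ p.2.length ≤ par.size)

theorem good_insert_fresh {d : PySem.Dict Int (Int × Int)} {k : Int} {v : Int × Int}
    (hk : d.get? k = none) : ∀ {x lr}, Good d x lr → Good (d.insert k v) x lr := by
  intro x lr h
  induction lr generalizing x with
  | nil => exact h
  | cons b lr ih =>
    obtain ⟨p, hget, hg⟩ := h
    refine ⟨p, ?_, ih hg⟩
    have hxk : x ≠ k := by intro he; rw [he, hk] at hget; cases hget
    rw [PySem.Dict.get?_insert_of_ne _ _ hxk, hget]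

theorem reconB_succ (n : Nat) (d : PySem.Dict Int (Int × Int)) (x : Int) (acc : List Int) :
    reconB (n + 1) d x acc = if x = 0 then some acc.reverse
      else match d.get? x with
        | none => none
        | some (p, b) => reconB n d p (acc ++ [b]) := rfl

theorem recon_of_good {d : PySem.Dict Int (Int × Int)} (h0 : d.get? 0 = none) :
    ∀ {lr : List Int} {x : Int} {n : Nat} (acc : List Int), Good d x lr → lr.length ≤ n →
      reconB (n + 1) d x acc = some ((acc ++ lr).reverse) := by
  intro lr
  induction lr with
  | nil =>
    intro x n acc hg _
    simp only [Good] at hg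
    subst hg
    simp [reconB_succ]
  | cons b lr ih =>
    intro x n acc hg hn
    obtain ⟨p, hget, hgp⟩ := hg
    have hx0 : x ≠ 0 := by intro he; rw [he, h0] at hget; cases hget
    cases n with
    | zero => simp at hn
    | succ m =>
      have hrec := ih (acc ++ [b]) hgp (by simpa using hn)
      rw [reconB_succ, if_neg hx0, hget]
      simpa using hrec

theorem size_insert_fresh (d : PySem.Dict Int (Int × Int)) (k : Int) (v : Int × Int)
    (hk : d.get? k = none) : (d.insert k v).size = d.size + 1 := by
  have hc : d.contains k = false := by
    rw [PySem.Dict.contains_eq_isSome_get?, hk]; rfl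
  simp [PySem.Dict.size, PySem.Dict.items_insert, hc]

theorem fold_step (bs : List Int) (x : Int) (l : List Int) :
    ∀ (qA : List (Int × List Int)) (qB : List Int) (vis : PySem.Set Int)
      (par : PySem.Dict Int (Int × Int)),
      BfsInv qA qB vis par → Good par x l.reverse → l.length ≤ par.size →
      (BfsInv (bs.foldl (fun (st : List (Int × List Int) × PySem.Set Int) b =>
          let nx := PySem.Int.bxor x b
          if PySem.Set.contains st.2 nx then st
          else (st.1 ++ [(nx, l ++ [b])], PySem.Set.add st.2 nx)) (qA, vis)).1
        (bs.foldl (fun (st : List Int × PySem.Set Int × PySem.Dict Int (Int × Int)) b =>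
          let nx := PySem.Int.bxor x b
          if PySem.Set.contains st.2.1 nx then st
          else (st.1 ++ [nx], PySem.Set.add st.2.1 nx, st.2.2.insert nx (x, b))) (qB, vis, par)).1
        (bs.foldl (fun (st : List (Int × List Int) × PySem.Set Int) b =>
          let nx := PySem.Int.bxor x b
          if PySem.Set.contains st.2 nx then st
          else (st.1 ++ [(nx, l ++ [b])], PySem.Set.add st.2 nx)) (qA, vis)).2
        (bs.foldl (fun (st : List Int × PySem.Set Int × PySem.Dict Int (Int × Int)) b =>
          let nx := PySem.Int.bxor x b
          if PySem.Set.contains st.2.1 nx then st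
          else (st.1 ++ [nx], PySem.Set.add st.2.1 nx, st.2.2.insert nx (x, b))) (qB, vis, par)).2.2
       ∧ (bs.foldl (fun (st : List (Int × List Int) × PySem.Set Int) b =>
          let nx := PySem.Int.bxor x b
          if PySem.Set.contains st.2 nx then st
          else (st.1 ++ [(nx, l ++ [b])], PySem.Set.add st.2 nx)) (qA, vis)).2
        = (bs.foldl (fun (st : List Int × PySem.Set Int × PySem.Dict Int (Int × Int)) b =>
          let nx := PySem.Int.bxor x b
          if PySem.Set.contains st.2.1 nx then st
          else (st.1 ++ [nx], PySem.Set.add st.2.1 nx, st.2.2.insert nx (x, b))) (qB, vis, par)).2.1) := by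
  induction bs with
  | nil => intro qA qB vis par hI _ _; exact ⟨hI, rfl⟩
  | cons b bs ih =>
    intro qA qB vis par hI hGood hLen
    obtain ⟨hmap, h0vis, h0par, hkeys, hall⟩ := hI
    simp only [List.foldl_cons]
    by_cases hc : PySem.Set.contains vis (PySem.Int.bxor x b) = true
    · simp only [hc, if_true]
      exact ih qA qB vis par ⟨hmap, h0vis, h0par, hkeys, hall⟩ hGood hLen
    · simp only [hc]
      set nx := PySem.Int.bxor x b with hnx
      have hfresh : par.get? nx = none := by
        cases h : par.get? nx with
        | none => rfl
        | some v => exact absurd (hkeys nx (by rw [h]; rfl)) (by simpa using hc)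
      have hnx0 : nx ≠ 0 := by
        intro he; rw [he] at hc; exact hc h0vis
      have hsize : (par.insert nx (x, b)).size = par.size + 1 :=
        size_insert_fresh par nx (x, b) hfresh
      apply ih
      · refine ⟨by simp [hmap], ?_, ?_, ?_, ?_⟩
        · have h0m : (0 : Int) ∈ vis := by simpa [PySem.Set.contains] using h0vis
          simp [PySem.Set.contains, PySem.Set.mem_add, h0m]
        · rw [PySem.Dict.get?_insert_of_ne _ _ (Ne.symm hnx0)]; exact h0par
        · intro k hk
          by_cases hkn : k = nx
          · subst hkn
            simp [PySem.Set.contains, PySem.Set.mem_add]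
          · rw [PySem.Dict.get?_insert_of_ne _ _ hkn] at hk
            have hm : k ∈ vis := by simpa [PySem.Set.contains] using hkeys k hk
            simp [PySem.Set.contains, PySem.Set.mem_add, hm]
        · intro p hp
          rcases List.mem_append.mp hp with hp | hp
          · obtain ⟨hg, hl⟩ := hall p hp
            exact ⟨good_insert_fresh hfresh hg, by omega⟩
          · simp only [List.mem_singleton] at hp
            subst hp
            refine ⟨?_, by simp [hsize]; omega⟩
            simp only [List.reverse_append, List.reverse_cons, List.reverse_nil,
              List.nil_append, List.singleton_append]
            exact ⟨x, PySem.Dict.get?_insert_self _ _ _, good_insert_fresh hfresh hGood⟩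
      · exact good_insert_fresh hfresh hGood
      · omega

theorem loopA_succ (bs : List Int) (t : Int) (n : Nat) (x : Int) (l : List Int)
    (q : List (Int × List Int)) (vis : PySem.Set Int) :
    loopA bs t (n + 1) ((x, l) :: q) vis =
      if x = t then some l
      else loopA bs t n
        (bs.foldl (fun (st : List (Int × List Int) × PySem.Set Int) b =>
          let nx := PySem.Int.bxor x b
          if PySem.Set.contains st.2 nx then st
          else (st.1 ++ [(nx, l ++ [b])], PySem.Set.add st.2 nx)) (q, vis)).1
        (bs.foldl (fun (st : List (Int × List Int) × PySem.Set Int) b =>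
          let nx := PySem.Int.bxor x b
          if PySem.Set.contains st.2 nx then st
          else (st.1 ++ [(nx, l ++ [b])], PySem.Set.add st.2 nx)) (q, vis)).2 := rfl

theorem loopB_succ (bs : List Int) (t : Int) (n : Nat) (x : Int) (q : List Int)
    (vis : PySem.Set Int) (par : PySem.Dict Int (Int × Int)) :
    loopB bs t (n + 1) (x :: q) vis par =
      if x = t then reconB (par.size + 1) par x []
      else loopB bs t n
        (bs.foldl (fun (st : List Int × PySem.Set Int × PySem.Dict Int (Int × Int)) b =>
          let nx := PySem.Int.bxor x b
          if PySem.Set.contains st.2.1 nx then st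
          else (st.1 ++ [nx], PySem.Set.add st.2.1 nx, st.2.2.insert nx (x, b))) (q, vis, par)).1
        (bs.foldl (fun (st : List Int × PySem.Set Int × PySem.Dict Int (Int × Int)) b =>
          let nx := PySem.Int.bxor x b
          if PySem.Set.contains st.2.1 nx then st
          else (st.1 ++ [nx], PySem.Set.add st.2.1 nx, st.2.2.insert nx (x, b))) (q, vis, par)).2.1
        (bs.foldl (fun (st : List Int × PySem.Set Int × PySem.Dict Int (Int × Int)) b =>
          let nx := PySem.Int.bxor x b
          if PySem.Set.contains st.2.1 nx then st
          else (st.1 ++ [nx], PySem.Set.add st.2.1 nx, st.2.2.insert nx (x, b))) (q, vis, par)).2.2 := rfl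

theorem loop_eq (bs : List Int) (t : Int) :
    ∀ (n : Nat) (qA : List (Int × List Int)) (qB : List Int) (vis : PySem.Set Int)
      (par : PySem.Dict Int (Int × Int)), BfsInv qA qB vis par →
      loopA bs t n qA vis = loopB bs t n qB vis par := by
  intro n
  induction n with
  | zero => intro qA qB vis par _; rfl
  | succ m ih =>
    intro qA qB vis par hI
    obtain ⟨hmap, h0vis, h0par, hkeys, hall⟩ := hI
    cases qA with
    | nil =>
      have : qB = [] := by simpa using hmap
      subst this; rfl
    | cons hd qA' =>
      obtain ⟨x, l⟩ := hd
      have hqB : qB = x :: qA'.map Prod.fst := by simpa using hmap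
      subst hqB
      by_cases hx : x = t
      · obtain ⟨hg, hl⟩ := hall (x, l) (List.mem_cons_self ..)
        rw [loopA_succ, loopB_succ, if_pos hx, if_pos hx]
        rw [recon_of_good h0par [] hg (by simpa using hl)]
        simp
      · rw [loopA_succ, loopB_succ, if_neg hx, if_neg hx]
        have hall' : ∀ p ∈ qA', Good par p.1 p.2.reverse ∧ p.2.length ≤ par.size :=
          fun p hp => hall p (List.mem_cons_of_mem _ hp)
        obtain ⟨hg, hl⟩ := hall (x, l) (List.mem_cons_self ..)
        obtain ⟨hI', hvis⟩ := fold_step bs x l qA' (qA'.map Prod.fst) vis par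
          ⟨rfl, h0vis, h0par, hkeys, hall'⟩ hg hl
        rw [hvis] at hI' ⊢
        exact ih _ _ _ _ hI'

-- ===== VERDICT (by name: the statement is the Claim_ definition above) =====
theorem values_needed_to_xor_to_target_spec : Claim_equal_values_needed_to_xor_to_target := by
  intro bs t _
  unfold Spec_values_needed_to_xor_to_target values_needed_to_xor_to_target values_needed_to_xor_to_target_alt
  by_cases ht : t = 0
  · subst ht
    simp [loopA]
  · rw [if_neg ht]
    apply loop_eq
    refine ⟨rfl, by decide, by decide, ?_, ?_⟩
    · intro k hk
      simp [PySem.Dict.get?_empty] at hk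
    · intro p hp
      simp only [List.mem_singleton] at hp
      subst hp
      exact ⟨rfl, by simp [PySem.Dict.size, PySem.Dict.empty]⟩
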